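-- pv_equiv track=rewrite | github.com/Ptnan7/Skills | cdn-cli/scripts/swagger_diff.py | version_to_tag
-- ===== SOURCE A (Python) =====
-- def version_to_tag(version, tags):
--     """Find the tag name that matches a version string like '2025-11-01' or '2025-09-01-preview'."""
--     version_parts = version.split("-")
--     year_month = f"{version_parts[0]}-{version_parts[1]}" if len(version_parts) >= 2 else version
--     is_preview = "preview" in version
--
--     # Build candidate list in priority order
--     candidates = []
--     if is_preview:
--         # e.g. package-preview-2025-09, package-2025-09-01-preview
--         candidates.append(f"package-preview-{year_month}")
--         candidates.append(f"package-{version}")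
--     else:
--         # e.g. package-2025-11, package-2025-11-01
--         candidates.append(f"package-{year_month}")
--         candidates.append(f"package-{version}")
--
--     for candidate in candidates:
--         if candidate in tags:
--             return candidate
--
--     # Fallback: find tags containing the version substring or year-month
--     # Prefer tags that also match the preview/stable nature
--     for tag_name in tags:
--         tag_lower = tag_name.lower()
--         tag_is_preview = "preview" in tag_lower
--         if tag_is_preview != is_preview:
--             continue
--         if year_month in tag_name:
--             return tag_name
--
--     # Last resort: any tag containing year-month
--     for tag_name in tags:
--         if year_month in tag_name:
--             return tag_name
--
--     return None
-- ===== SOURCE B (Python) =====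
-- def version_to_tag(version, tags):
--     """Find the tag name that matches a version string like '2025-11-01' or '2025-09-01-preview'."""
--     version_parts = version.split("-")
--     year_month = f"{version_parts[0]}-{version_parts[1]}" if len(version_parts) >= 2 else version
--     is_preview = "preview" in version
--
--     prefix = "package-preview-" if is_preview else "package-"
--     for candidate in (prefix + year_month, "package-" + version):
--         if candidate in tags:
--             return candidate
--
--     # One pass over tags: first any-match and first nature-match accumulated together
--     any_match = None
--     nature_match = None
--     for tag_name in tags:
--         if year_month in tag_name:
--             if any_match is None:
--                 any_match = tag_name
--             if nature_match is None and ("preview" in tag_name.lower()) == is_preview: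
--                 nature_match = tag_name
--     return nature_match if nature_match is not None else any_match
-- ===== Notes on version B (the rewrite author's own statement) =====
-- stated objective: alternative
-- what changed: The two sequential fallback scans over tags (nature-matching scan, then any-match scan) are fused into a single traversal that accumulates the first any-match and the first nature-match together, selecting the nature-match afterwards.
import Mathlib
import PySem

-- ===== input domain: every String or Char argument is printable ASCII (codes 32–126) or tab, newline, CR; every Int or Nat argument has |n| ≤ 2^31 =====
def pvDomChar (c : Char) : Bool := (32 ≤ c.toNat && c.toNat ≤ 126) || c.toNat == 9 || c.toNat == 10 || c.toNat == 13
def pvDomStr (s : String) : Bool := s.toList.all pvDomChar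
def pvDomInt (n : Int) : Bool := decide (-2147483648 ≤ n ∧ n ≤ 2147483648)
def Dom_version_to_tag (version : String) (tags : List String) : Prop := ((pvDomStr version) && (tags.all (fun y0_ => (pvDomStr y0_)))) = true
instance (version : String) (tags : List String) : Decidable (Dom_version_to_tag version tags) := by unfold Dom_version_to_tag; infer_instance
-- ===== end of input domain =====

-- B folds the two fallback scans of A into one pass over tags that accumulates the first
-- any-match and the first nature-match together (objective: alternative single-traversal decomposition).


-- ===== PORT A =====
def version_to_tag (version : String) (tags : List String) : Option String :=
  let version_parts := (PySem.Str.split? version "-").getD []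
  let year_month :=
    if 2 ≤ version_parts.length then
      PySem.Str.join "-" [version_parts.getD 0 "", version_parts.getD 1 ""]
    else version
  let is_preview := PySem.Str.isIn "preview" version
  let candidates : List String :=
    if is_preview then
      [PySem.Str.join "" ["package-preview-", year_month], PySem.Str.join "" ["package-", version]]
    else
      [PySem.Str.join "" ["package-", year_month], PySem.Str.join "" ["package-", version]]
  match candidates.find? (fun c => tags.contains c) with
  | some c => some c
  | none =>
    -- first fallback loop: tags whose preview-nature matches and that contain year_month
    match tags.find? (fun t =>
        (PySem.Str.isIn "preview" (PySem.Str.lower t) == is_preview) && PySem.Str.isIn year_month t) with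
    | some t => some t
    | none =>
      -- last-resort loop: any tag containing year_month
      tags.find? (fun t => PySem.Str.isIn year_month t)

-- ===== PORT B =====
-- 'x if x is not None else y' on optionals (shared by B's fold and its final selection)
def pyOr (x y : Option String) : Option String :=
  match x with | some v => some v | none => y

def version_to_tag_alt (version : String) (tags : List String) : Option String :=
  let version_parts := (PySem.Str.split? version "-").getD []
  let year_month :=
    if 2 ≤ version_parts.length then
      PySem.Str.join "-" [version_parts.getD 0 "", version_parts.getD 1 ""]
    else version
  let is_preview := PySem.Str.isIn "preview" version
  let pfx := if is_preview then "package-preview-" else "package-"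
  let exact_candidates := [PySem.Str.join "" [pfx, year_month], PySem.Str.join "" ["package-", version]]
  match exact_candidates.find? (fun c => tags.contains c) with
  | some c => some c
  | none =>
    -- single pass: accumulate (first any-match, first nature-match)
    let p := tags.foldl (fun (acc : Option String × Option String) t =>
        if PySem.Str.isIn year_month t then
          (pyOr acc.1 (some t),
           pyOr acc.2 (if PySem.Str.isIn "preview" (PySem.Str.lower t) == is_preview then some t else none))
        else acc) (none, none)
    pyOr p.2 p.1

-- ===== PRECONDITION & SPEC =====
def Spec_version_to_tag (version : String) (tags : List String) (out : Option String) : Prop := out = version_to_tag_alt version tags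
instance (version : String) (tags : List String) (out : Option String) : Decidable (Spec_version_to_tag version tags out) := by unfold Spec_version_to_tag; infer_instance

-- ===== CLAIM (what is proved, stated in full; the proofs are below) =====
def Claim_equal_version_to_tag : Prop := ∀ (version : String) (tags : List String), Dom_version_to_tag version tags → Spec_version_to_tag version tags (version_to_tag version tags)

-- ===== LEMMAS AND PROOFS =====

-- The candidate lists of the two ports coincide (B factors the prefix out of A's if/else).
theorem cand_eq (ip : Bool) (ym v : String) :
    (if ip = true then
      [PySem.Str.join "" ["package-preview-", ym], PySem.Str.join "" ["package-", v]]
    else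
      [PySem.Str.join "" ["package-", ym], PySem.Str.join "" ["package-", v]])
    = [PySem.Str.join "" [(if ip = true then "package-preview-" else "package-"), ym],
       PySem.Str.join "" ["package-", v]] := by
  cases ip <;> rfl

-- B's single fold computes (a else first p-match, n else first (q and p)-match) for any accumulator.
theorem fold_pair_spec (p q : String → Bool) (ts : List String) (a n : Option String) :
    ts.foldl (fun (acc : Option String × Option String) t =>
      if p t then
        (pyOr acc.1 (some t),
         pyOr acc.2 (if q t then some t else none))
      else acc) (a, n)
    = (a.or (ts.find? p), n.or (ts.find? (fun t => q t && p t))) := by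
  induction ts generalizing a n with
  | nil => simp
  | cons t ts ih =>
    simp only [List.foldl_cons, List.find?_cons]
    cases hp : p t
    · rw [if_neg (by simp), ih]
      simp [Bool.and_false]
    · rw [if_pos rfl, ih]
      cases hq : q t <;> cases a <;> cases n <;> simp [pyOr]

-- ===== VERDICT (by name: the statement is the Claim_ definition above) =====
theorem version_to_tag_spec : Claim_equal_version_to_tag := by
  intro version tags _
  unfold Spec_version_to_tag
  simp only [version_to_tag, version_to_tag_alt]
  rw [cand_eq]
  cases hc : List.find? (fun c => tags.contains c)
      [PySem.Str.join "" [(if PySem.Str.isIn "preview" version = true then "package-preview-" else "package-"),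
        (if 2 ≤ ((PySem.Str.split? version "-").getD []).length then
          PySem.Str.join "-" [((PySem.Str.split? version "-").getD []).getD 0 "", ((PySem.Str.split? version "-").getD []).getD 1 ""]
        else version)],
       PySem.Str.join "" ["package-", version]] with
  | some c => simp
  | none =>
    rw [fold_pair_spec
      (fun t => PySem.Str.isIn (if 2 ≤ ((PySem.Str.split? version "-").getD []).length then
          PySem.Str.join "-" [((PySem.Str.split? version "-").getD []).getD 0 "", ((PySem.Str.split? version "-").getD []).getD 1 ""]
        else version) t)
      (fun t => PySem.Str.isIn "preview" (PySem.Str.lower t) == PySem.Str.isIn "preview" version)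
      tags none none]
    cases hn : tags.find? (fun t =>
        (PySem.Str.isIn "preview" (PySem.Str.lower t) == PySem.Str.isIn "preview" version) &&
        PySem.Str.isIn (if 2 ≤ ((PySem.Str.split? version "-").getD []).length then
          PySem.Str.join "-" [((PySem.Str.split? version "-").getD []).getD 0 "", ((PySem.Str.split? version "-").getD []).getD 1 ""]
        else version) t) with
    | some t => simp [pyOr]
    | none => simp [pyOr]
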